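-- pv_equiv track=rewrite | github.com/samhardyhey/databricks-misc | data/healthcare_data_medallion/app/app.py | schemas_for_layer
-- ===== SOURCE A (Python) =====
-- from typing import Sequence
--
-- def layer_key_for_schema(schema: str, fixed_raw: str) -> str:
--     if schema == fixed_raw:
--         return "raw"
--     if schema.endswith("_bronze"):
--         return "bronze"
--     if schema.endswith("_silver"):
--         return "silver"
--     if schema.endswith("_gold"):
--         return "gold"
--     return "other"
--
-- def schemas_for_layer(
--     all_schemas: Sequence[str], layer_id: str, fixed_raw: str
-- ) -> list[str]:
--     if layer_id == "raw":
--         return [s for s in all_schemas if s == fixed_raw]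
--     if layer_id == "other":
--         keys = {"raw", "bronze", "silver", "gold"}
--         return [
--             s
--             for s in all_schemas
--             if layer_key_for_schema(s, fixed_raw) not in keys
--         ]
--     return [s for s in all_schemas if layer_key_for_schema(s, fixed_raw) == layer_id]
-- ===== SOURCE B (Python) =====
-- def layer_key_for_schema(schema: str, fixed_raw: str) -> str:
--     if schema == fixed_raw:
--         return "raw"
--     if schema.endswith("_bronze"):
--         return "bronze"
--     if schema.endswith("_silver"):
--         return "silver"
--     if schema.endswith("_gold"):
--         return "gold"
--     return "other"
--
--
-- def schemas_for_layer(all_schemas, layer_id, fixed_raw):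
--     # Group every schema by its layer key in one pass, then select by lookup.
--     groups = {}
--     for s in all_schemas:
--         groups.setdefault(layer_key_for_schema(s, fixed_raw), []).append(s)
--     return groups.get(layer_id, [])
-- ===== Notes on version B (the rewrite author's own statement) =====
-- stated objective: alternative
-- what changed: B builds a dict grouping all schemas by their layer key in one pass and answers by a single lookup, instead of A's branch-per-layer tailored filter predicates.
import Mathlib
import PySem

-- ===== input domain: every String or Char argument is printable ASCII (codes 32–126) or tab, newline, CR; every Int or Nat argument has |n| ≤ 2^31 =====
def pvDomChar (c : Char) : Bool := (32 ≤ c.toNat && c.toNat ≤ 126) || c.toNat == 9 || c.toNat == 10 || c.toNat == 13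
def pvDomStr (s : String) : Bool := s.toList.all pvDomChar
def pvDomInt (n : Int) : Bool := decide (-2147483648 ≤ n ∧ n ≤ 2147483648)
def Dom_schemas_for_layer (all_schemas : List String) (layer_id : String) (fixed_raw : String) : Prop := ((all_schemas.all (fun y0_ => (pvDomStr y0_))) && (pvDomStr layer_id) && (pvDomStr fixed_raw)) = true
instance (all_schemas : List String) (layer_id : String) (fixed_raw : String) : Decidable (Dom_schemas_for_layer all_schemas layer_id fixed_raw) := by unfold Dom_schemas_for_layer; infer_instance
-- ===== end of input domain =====

-- B replaces A's per-layer branch-and-filter with a one-pass dict grouping schemas by layer key,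
-- answered by a single lookup (objective: alternative decomposition, same cost).


-- ===== PORT A =====
-- shared module helper (both Pythons use it verbatim)
def layerKey (schema : String) (fixed_raw : String) : String :=
  if schema == fixed_raw then "raw"
  else if PySem.Str.endswith schema "_bronze" then "bronze"
  else if PySem.Str.endswith schema "_silver" then "silver"
  else if PySem.Str.endswith schema "_gold" then "gold"
  else "other"

def schemas_for_layer (all_schemas : List String) (layer_id : String) (fixed_raw : String) : List String :=
  if layer_id == "raw" then
    all_schemas.filter (fun s => s == fixed_raw)
  else if layer_id == "other" then
    let keys := PySem.Set.ofList ["raw", "bronze", "silver", "gold"]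
    all_schemas.filter (fun s => !(keys.contains (layerKey s fixed_raw)))
  else
    all_schemas.filter (fun s => layerKey s fixed_raw == layer_id)

-- ===== PORT B =====
def schemas_for_layer_alt (all_schemas : List String) (layer_id : String) (fixed_raw : String) : List String :=
  let groups : PySem.Dict String (List String) :=
    all_schemas.foldl
      (fun d s => d.modify (layerKey s fixed_raw) [] (fun l => l ++ [s]))
      PySem.Dict.empty
  groups.getD layer_id []

-- ===== PRECONDITION & SPEC =====
def Spec_schemas_for_layer (all_schemas : List String) (layer_id : String) (fixed_raw : String) (out : List String) : Prop := out = schemas_for_layer_alt all_schemas layer_id fixed_raw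
instance (all_schemas : List String) (layer_id : String) (fixed_raw : String) (out : List String) : Decidable (Spec_schemas_for_layer all_schemas layer_id fixed_raw out) := by unfold Spec_schemas_for_layer; infer_instance

-- ===== CLAIM (what is proved, stated in full; the proofs are below) =====
def Claim_equal_schemas_for_layer : Prop := ∀ (all_schemas : List String) (layer_id : String) (fixed_raw : String), Dom_schemas_for_layer all_schemas layer_id fixed_raw → Spec_schemas_for_layer all_schemas layer_id fixed_raw (schemas_for_layer all_schemas layer_id fixed_raw)

-- ===== LEMMAS AND PROOFS =====

-- ===== VERDICT (by name: the statement is the Claim_ definition above) =====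
-- grouping fold, looked up at k, is the filter of schemas whose key is k
theorem foldl_group_getD (fixed_raw k : String) (xs : List String)
    (d : PySem.Dict String (List String)) :
    (xs.foldl (fun d s => d.modify (layerKey s fixed_raw) [] (fun l => l ++ [s])) d).getD k []
      = d.getD k [] ++ xs.filter (fun s => layerKey s fixed_raw == k) := by
  induction xs generalizing d with
  | nil => simp
  | cons x xs ih =>
    simp only [List.foldl_cons, List.filter_cons, ih]
    by_cases h : layerKey x fixed_raw = k
    · simp [h, PySem.Dict.getD_modify_self]
    · simp [h, PySem.Dict.getD_modify_of_ne (hne := Ne.symm h)]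

theorem alt_eq_filter (all_schemas : List String) (layer_id fixed_raw : String) :
    schemas_for_layer_alt all_schemas layer_id fixed_raw
      = all_schemas.filter (fun s => layerKey s fixed_raw == layer_id) := by
  unfold schemas_for_layer_alt
  simp [foldl_group_getD]

theorem layerKey_cases (s fixed_raw : String) :
    layerKey s fixed_raw = "raw" ∨ layerKey s fixed_raw = "bronze" ∨
    layerKey s fixed_raw = "silver" ∨ layerKey s fixed_raw = "gold" ∨
    layerKey s fixed_raw = "other" := by
  unfold layerKey; split_ifs <;> simp

theorem schemas_for_layer_spec : Claim_equal_schemas_for_layer := by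
  intro all_schemas layer_id fixed_raw _
  unfold Spec_schemas_for_layer
  rw [alt_eq_filter]
  unfold schemas_for_layer
  by_cases hraw : layer_id = "raw"
  · subst hraw
    simp only [beq_self_eq_true, if_true]
    apply List.filter_congr
    intro s _
    unfold layerKey
    split_ifs with h1 h2 h3 h4 <;> simp_all
  · by_cases hoth : layer_id = "other"
    · subst hoth
      simp only [show ((("other" : String) == "raw") = false) from by decide,
        beq_self_eq_true, if_true]
      apply List.filter_congr
      intro s _
      rcases layerKey_cases s fixed_raw with h | h | h | h | h <;> rw [h] <;> decide
    · simp [hraw, hoth]
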